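-- pv_equiv track=rewrite | github.com/sangminsang/mahjong_yolo_project | apis/discard/logic.py | is_chiitoi_tenpai
-- ===== SOURCE A (Python) =====
-- from collections import Counter
--
-- def is_chiitoi_tenpai(hand):
--     tile_count = Counter(hand)
--     pairs = 0
--     singles = 0
--
--     for tile, count in tile_count.items():
--         if count >= 2:
--             pairs += 1
--         elif count == 1:
--             singles += 1
--
--     # 치또이 텐파이 조건:
--     # 1. 6쌍이 있고 단패가 1개인 경우
--     return pairs == 6 and singles == 1
-- ===== SOURCE B (Python) =====
-- def is_chiitoi_tenpai(hand):
--     # Different decomposition: repeatedly strip every copy of the leading tile,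
--     # classifying each distinct tile as a pair (count >= 2) or a single.
--     pairs = 0
--     singles = 0
--     rest = list(hand)
--     while rest:
--         t = rest[0]
--         if rest.count(t) >= 2:
--             pairs += 1
--         else:
--             singles += 1
--         rest = [x for x in rest if x != t]
--     return pairs == 6 and singles == 1
-- ===== Notes on version B (the rewrite author's own statement) =====
-- stated objective: alternative
-- what changed: Replaces the Counter hash-tally plus items() classification loop with a strip-the-leading-tile recursion: repeatedly count and remove every copy of the first remaining tile, classifying each distinct tile as a pair (count >= 2) or a single.
import Mathlib
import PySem

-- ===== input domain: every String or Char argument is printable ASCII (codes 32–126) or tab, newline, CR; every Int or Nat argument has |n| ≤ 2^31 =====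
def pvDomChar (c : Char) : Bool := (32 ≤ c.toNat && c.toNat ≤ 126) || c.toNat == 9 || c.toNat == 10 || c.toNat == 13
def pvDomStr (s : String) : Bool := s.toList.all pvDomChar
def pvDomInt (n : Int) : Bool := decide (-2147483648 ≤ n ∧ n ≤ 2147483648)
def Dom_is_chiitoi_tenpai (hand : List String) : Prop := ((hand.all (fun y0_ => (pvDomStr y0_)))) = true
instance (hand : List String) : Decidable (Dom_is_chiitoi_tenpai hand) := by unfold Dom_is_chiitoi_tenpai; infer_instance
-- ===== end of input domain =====

-- B replaces the Counter-based tally with a strip-the-first-tile recursion (no dict): same result, alternative decomposition.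


-- ===== PORT A =====
def is_chiitoi_tenpai (hand : List String) : Bool :=
  let tile_count := PySem.Dict.counter hand
  let ps := (PySem.Dict.items tile_count).foldl
      (fun (ps : Int × Int) kv =>
        if 2 ≤ kv.2 then (ps.1 + 1, ps.2)
        else if kv.2 == 1 then (ps.1, ps.2 + 1)
        else ps) ((0 : Int), (0 : Int))
  decide (ps.1 = 6) && decide (ps.2 = 1)

-- ===== PORT B =====
def chiitoiStrip : List String → Int → Int → Int × Int
  | [], pairs, singles => (pairs, singles)
  | t :: tl, pairs, singles =>
    if 2 ≤ (t :: tl).count t then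
      chiitoiStrip ((t :: tl).filter (fun x => x != t)) (pairs + 1) singles
    else
      chiitoiStrip ((t :: tl).filter (fun x => x != t)) pairs (singles + 1)
termination_by l _ _ => l.length
decreasing_by
  all_goals
    have h : ((t :: tl).filter (fun x => x != t)).length ≤ tl.length := by
      simp only [List.filter_cons, bne_self_eq_false, if_false, Bool.false_eq_true]
      exact List.length_filter_le _ _
    simpa using Nat.lt_succ_of_le h

def is_chiitoi_tenpai_alt (hand : List String) : Bool :=
  let ps := chiitoiStrip hand 0 0
  decide (ps.1 = 6) && decide (ps.2 = 1)

-- ===== PRECONDITION & SPEC =====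
def Spec_is_chiitoi_tenpai (hand : List String) (out : Bool) : Prop := out = is_chiitoi_tenpai_alt hand
instance (hand : List String) (out : Bool) : Decidable (Spec_is_chiitoi_tenpai hand out) := by unfold Spec_is_chiitoi_tenpai; infer_instance

-- ===== CLAIM (what is proved, stated in full; the proofs are below) =====
def Claim_equal_is_chiitoi_tenpai : Prop := ∀ (hand : List String), Dom_is_chiitoi_tenpai hand → Spec_is_chiitoi_tenpai hand (is_chiitoi_tenpai hand)

-- ===== LEMMAS AND PROOFS =====

-- number of distinct tiles occurring ≥ 2 (resp. exactly 1) times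
def pairCount (l : List String) : Nat := (l.toFinset.filter (fun k => 2 ≤ l.count k)).card
def singleCount (l : List String) : Nat := (l.toFinset.filter (fun k => l.count k = 1)).card

lemma afold (hand : List String) (d : List String) (p s : Int) :
    (d.map (fun k => (k, (hand.count k : Int)))).foldl
      (fun (ps : Int × Int) kv =>
        if 2 ≤ kv.2 then (ps.1 + 1, ps.2)
        else if kv.2 == 1 then (ps.1, ps.2 + 1)
        else ps) (p, s)
    = (p + (d.countP (fun k => decide (2 ≤ hand.count k)) : Int),
       s + (d.countP (fun k => decide (hand.count k = 1)) : Int)) := by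
  induction d generalizing p s with
  | nil => simp
  | cons t tl ih =>
    rw [List.map_cons, List.foldl_cons, List.countP_cons, List.countP_cons]
    dsimp only
    by_cases h2 : 2 ≤ hand.count t
    · have hi : (2 : Int) ≤ (hand.count t : Int) := by exact_mod_cast h2
      have h1 : ¬ hand.count t = 1 := by omega
      rw [if_pos hi, ih]
      simp only [Prod.mk.injEq]
      simp [h2, h1]
      all_goals omega
    · have hi : ¬ (2 : Int) ≤ (hand.count t : Int) := by exact_mod_cast h2
      by_cases h1 : hand.count t = 1
      · have hb : ((hand.count t : Int) == 1) = true := by simp [h1]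
        rw [if_neg hi, if_pos hb, ih]
        simp only [Prod.mk.injEq]
        simp [h1]
        all_goals omega
      · have hb : ¬ ((hand.count t : Int) == 1) = true := by
          simp
          exact_mod_cast h1
        rw [if_neg hi, if_neg hb, ih]
        simp only [Prod.mk.injEq]
        simp [h2, h1]

lemma countP_dedup_eq_card (l : List String) (p : String → Bool) :
    (PySem.List.dedup l).countP p = (l.toFinset.filter (fun k => p k = true)).card := by
  have hnd : (PySem.List.dedup l).Nodup := PySem.List.nodup_dedup l
  have hfin : (PySem.List.dedup l).toFinset = l.toFinset := by
    ext k; simp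
  calc (PySem.List.dedup l).countP p
      = ((PySem.List.dedup l).filter p).length := List.countP_eq_length_filter
    _ = ((PySem.List.dedup l).filter p).toFinset.card := by
        rw [List.toFinset_card_of_nodup (List.Nodup.filter _ hnd)]
    _ = ((PySem.List.dedup l).toFinset.filter (fun k => p k = true)).card := by
        rw [List.toFinset_filter]
    _ = (l.toFinset.filter (fun k => p k = true)).card := by rw [hfin]

lemma counts_cons (t : String) (tl : List String) :
    pairCount (t :: tl) =
      pairCount (tl.filter (fun x => x != t)) + (if 2 ≤ (t :: tl).count t then 1 else 0)
    ∧ singleCount (t :: tl) =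
      singleCount (tl.filter (fun x => x != t)) + (if (t :: tl).count t = 1 then 1 else 0) := by
  set r := tl.filter (fun x => x != t) with hr
  have hmem : ∀ k, k ∈ r.toFinset ↔ (k ∈ tl ∧ k ≠ t) := by
    intro k; simp [hr, bne_iff_ne]
  have ht : t ∉ r.toFinset := by simp [hmem]
  have hset : (t :: tl).toFinset = insert t r.toFinset := by
    ext k
    by_cases hk : k = t
    · simp [hk]
    · simp [hmem, hk]
  have hcnt : ∀ k ∈ r.toFinset, r.count k = (t :: tl).count k := by
    intro k hk
    rcases (hmem k).mp hk with ⟨hktl, hkt⟩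
    have h1 : r.count k = tl.count k := by
      rw [hr]; exact List.count_filter (by simp [hkt])
    rw [h1, List.count_cons]
    simp [Ne.symm hkt]
  constructor
  · unfold pairCount
    rw [hset, Finset.filter_insert]
    have hcong : (r.toFinset.filter (fun k => 2 ≤ (t :: tl).count k))
        = (r.toFinset.filter (fun k => 2 ≤ r.count k)) := by
      apply Finset.filter_congr
      intro k hk; rw [hcnt k hk]
    by_cases hp : 2 ≤ (t :: tl).count t
    · rw [if_pos hp, if_pos hp]
      rw [Finset.card_insert_of_notMem (fun hmem' => ht (Finset.mem_of_mem_filter _ hmem'))]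
      rw [hcong]
    · rw [if_neg hp, if_neg hp, hcong]
      omega
  · unfold singleCount
    rw [hset, Finset.filter_insert]
    have hcong : (r.toFinset.filter (fun k => (t :: tl).count k = 1))
        = (r.toFinset.filter (fun k => r.count k = 1)) := by
      apply Finset.filter_congr
      intro k hk; rw [hcnt k hk]
    by_cases hp : (t :: tl).count t = 1
    · rw [if_pos hp, if_pos hp]
      rw [Finset.card_insert_of_notMem (fun hmem' => ht (Finset.mem_of_mem_filter _ hmem'))]
      rw [hcong]
    · rw [if_neg hp, if_neg hp, hcong]
      omega

lemma strip_spec (n : Nat) : ∀ (l : List String) (p s : Int), l.length ≤ n →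
    chiitoiStrip l p s = (p + (pairCount l : Int), s + (singleCount l : Int)) := by
  induction n with
  | zero =>
    intro l p s hl
    have : l = [] := List.length_eq_zero_iff.mp (Nat.le_zero.mp hl)
    subst this
    simp [chiitoiStrip, pairCount, singleCount]
  | succ n ih =>
    intro l p s hl
    match l with
    | [] => simp [chiitoiStrip, pairCount, singleCount]
    | t :: tl =>
      have hfe : (t :: tl).filter (fun x => x != t) = tl.filter (fun x => x != t) := by
        simp
      have hlen : ((tl.filter (fun x => x != t))).length ≤ n := by
        exact le_trans (List.length_filter_le _ _) (Nat.le_of_succ_le_succ hl)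
      have hct : 1 ≤ (t :: tl).count t := by
        simp
      obtain ⟨hpc, hsc⟩ := counts_cons t tl
      by_cases h2 : 2 ≤ (t :: tl).count t
      · have h1 : ¬ (t :: tl).count t = 1 := by omega
        rw [chiitoiStrip, if_pos h2, hfe, ih _ _ _ hlen]
        rw [hpc, hsc, if_pos h2, if_neg h1]
        simp only [Prod.mk.injEq]
        constructor <;> (push_cast; omega)
      · have h1 : (t :: tl).count t = 1 := by omega
        rw [chiitoiStrip, if_neg h2, hfe, ih _ _ _ hlen]
        rw [hpc, hsc, if_neg h2, if_pos h1]
        simp only [Prod.mk.injEq]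
        constructor <;> (push_cast; omega)

-- ===== VERDICT (by name: the statement is the Claim_ definition above) =====
theorem is_chiitoi_tenpai_spec : Claim_equal_is_chiitoi_tenpai := by
  intro hand _
  unfold Spec_is_chiitoi_tenpai
  simp only [is_chiitoi_tenpai, is_chiitoi_tenpai_alt]
  rw [PySem.Dict.items_counter, ← PySem.List.dedup_eq_ofList]
  rw [afold, strip_spec hand.length hand 0 0 le_rfl]
  rw [countP_dedup_eq_card, countP_dedup_eq_card]
  simp [pairCount, singleCount]
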